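-- pv_equiv track=rewrite | github.com/albauer-priv/RPS | src/rps/ui/pages/athlete_profile/availability.py | _normalize_weekday
-- ===== SOURCE A (Python) =====
-- WEEKDAYS = ["Mon", "Tue", "Wed", "Thu", "Fri", "Sat", "Sun"]
--
-- def _normalize_weekday(value: str | None) -> str | None:
--     if not value:
--         return None
--     value = value.strip()
--     for day in WEEKDAYS:
--         if value.lower() == day.lower():
--             return day
--     return None
-- ===== SOURCE B (Python) =====
-- WEEKDAYS = ["Mon", "Tue", "Wed", "Thu", "Fri", "Sat", "Sun"]
--
-- _PACKED_LOWER = "montuewedthufrisatsun"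
-- _PACKED_CANON = "MonTueWedThuFriSatSun"
--
-- def _normalize_weekday(value):
--     if not value:
--         return None
--     key = value.strip().lower()
--     if len(key) != 3:
--         return None
--     i = _PACKED_LOWER.find(key)
--     if i < 0 or i % 3 != 0:
--         return None
--     return _PACKED_CANON[i:i + 3]
-- ===== Notes on version B (the rewrite author's own statement) =====
-- stated objective: alternative
-- what changed: Replaced the scan over the WEEKDAYS list comparing lowercased strings with a packed-string lookup: the lowercased 3-char key is located by a single substring find in the 21-char concatenation of the lowercased day names, a boundary check (index divisible by 3) validates the hit, and the canonical name is cut out of the parallel canonical concatenation by index arithmetic.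
import Mathlib
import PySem

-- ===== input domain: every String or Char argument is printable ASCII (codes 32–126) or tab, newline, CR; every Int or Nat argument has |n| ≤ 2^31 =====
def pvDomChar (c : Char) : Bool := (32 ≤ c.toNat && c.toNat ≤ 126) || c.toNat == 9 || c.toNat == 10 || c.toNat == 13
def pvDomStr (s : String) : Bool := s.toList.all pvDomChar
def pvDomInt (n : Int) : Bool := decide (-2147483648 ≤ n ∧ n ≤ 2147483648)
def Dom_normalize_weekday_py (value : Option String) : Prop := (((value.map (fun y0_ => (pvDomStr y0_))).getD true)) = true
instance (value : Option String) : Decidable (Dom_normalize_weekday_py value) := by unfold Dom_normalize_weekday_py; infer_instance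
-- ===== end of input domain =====

-- B replaces A's scan over the WEEKDAYS list with a packed-string lookup: one substring
-- find of the lowercased key in "montuewedthufrisatsun" plus a boundary check and a slice
-- of the parallel canonical string; objective: alternative (same cost, different algorithm).

-- ===== PORT A =====
def pvWeekdays : List String := ["Mon", "Tue", "Wed", "Thu", "Fri", "Sat", "Sun"]

def normalizeWeekdayLoop (v : String) : List String → Option String
  | [] => none
  | d :: rest =>
    if PySem.Str.lower v = PySem.Str.lower d then some d
    else normalizeWeekdayLoop v rest

def normalize_weekday_py (value : Option String) : Option String :=
  match value with
  | none => none
  | some v =>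
    if v = "" then none
    else normalizeWeekdayLoop (PySem.Str.strip v) pvWeekdays

-- ===== PORT B =====
def pvPackedLower : String := "montuewedthufrisatsun"
def pvPackedCanon : String := "MonTueWedThuFriSatSun"

def normalize_weekday_py_alt (value : Option String) : Option String :=
  match value with
  | none => none
  | some v =>
    if v = "" then none
    else
      let key := PySem.Str.lower (PySem.Str.strip v)
      if PySem.Str.len key ≠ 3 then none
      else
        let i := PySem.Str.find pvPackedLower key
        if i < 0 ∨ i % 3 ≠ 0 then none
        else some (PySem.Str.slice pvPackedCanon (some i) (some (i + 3)))

-- ===== PRECONDITION & SPEC =====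
def Spec_normalize_weekday_py (value : Option String) (out : Option String) : Prop := out = normalize_weekday_py_alt value
instance (value : Option String) (out : Option String) : Decidable (Spec_normalize_weekday_py value out) := by unfold Spec_normalize_weekday_py; infer_instance

-- ===== CLAIM (what is proved, stated in full; the proofs are below) =====
def Claim_equal_normalize_weekday_py : Prop := ∀ (value : Option String), Dom_normalize_weekday_py value → Spec_normalize_weekday_py value (normalize_weekday_py value)

-- ===== LEMMAS AND PROOFS =====
theorem lower_eq_iff (s t : String) :
    PySem.Str.lower s = PySem.Str.lower t ↔
    PySem.Chars.lower s.toList = PySem.Chars.lower t.toList := by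
  rw [← String.toList_inj]; simp [PySem.Str.toList_lower]

-- If the lowercased key is found in the packed string at a non-negative multiple of 3,
-- it is one of the seven 3-char day keys.
theorem find_boundary (k : List Char) (hlen : k.length = 3)
    (h0 : 0 ≤ PySem.Chars.find pvPackedLower.toList k)
    (h3 : PySem.Chars.find pvPackedLower.toList k % 3 = 0) :
    k = ['m','o','n'] ∨ k = ['t','u','e'] ∨ k = ['w','e','d'] ∨ k = ['t','h','u'] ∨
    k = ['f','r','i'] ∨ k = ['s','a','t'] ∨ k = ['s','u','n'] := by
  set i := PySem.Chars.find pvPackedLower.toList k with hi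
  have hne : PySem.Chars.findFrom pvPackedLower.toList k (((0 : Nat)) : Int) ≠ -1 := by
    simp only [Nat.cast_zero, PySem.Chars.findFrom_zero, ← hi]; omega
  have hspec := PySem.Chars.findFrom_natCast_spec pvPackedLower.toList k 0 (by norm_num) hne
  rw [Nat.cast_zero, PySem.Chars.findFrom_zero, ← hi] at hspec
  obtain ⟨-, hpre, -⟩ := hspec
  have htake : k = List.take 3 (List.drop i.toNat pvPackedLower.toList) := by
    have := List.prefix_iff_eq_take.mp hpre
    rwa [hlen] at this
  have hlen21 : pvPackedLower.toList.length = 21 := by decide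
  have hle : i.toNat ≤ 18 := by
    by_contra hgt
    push Not at hgt
    have hlt : (List.drop i.toNat pvPackedLower.toList).length < 3 := by
      simp [hlen21]; omega
    have := hpre.length_le
    omega
  have hcase : i.toNat = 0 ∨ i.toNat = 3 ∨ i.toNat = 6 ∨ i.toNat = 9 ∨ i.toNat = 12 ∨
      i.toNat = 15 ∨ i.toNat = 18 := by omega
  rcases hcase with h | h | h | h | h | h | h <;> rw [h] at htake <;> subst htake <;> decide

set_option maxHeartbeats 1600000 in
theorem branch_eq (k : List Char) :
    (if k = ['m','o','n'] then some "Mon"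
     else if k = ['t','u','e'] then some "Tue"
     else if k = ['w','e','d'] then some "Wed"
     else if k = ['t','h','u'] then some "Thu"
     else if k = ['f','r','i'] then some "Fri"
     else if k = ['s','a','t'] then some "Sat"
     else if k = ['s','u','n'] then some "Sun"
     else none) =
    (if ((k.length : Int)) ≠ 3 then none
     else if PySem.Chars.find pvPackedLower.toList k < 0 ∨
             PySem.Chars.find pvPackedLower.toList k % 3 ≠ 0 then none
     else some (PySem.Str.slice pvPackedCanon
            (some (PySem.Chars.find pvPackedLower.toList k))
            (some (PySem.Chars.find pvPackedLower.toList k + 3)))) := by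
  by_cases h3 : k.length = 3
  · by_cases hday : k = ['m','o','n'] ∨ k = ['t','u','e'] ∨ k = ['w','e','d'] ∨
        k = ['t','h','u'] ∨ k = ['f','r','i'] ∨ k = ['s','a','t'] ∨ k = ['s','u','n']
    · rcases hday with h | h | h | h | h | h | h <;> subst h <;> decide
    · push Not at hday
      obtain ⟨h1, h2, h3', h4, h5, h6, h7⟩ := hday
      have hbad : PySem.Chars.find pvPackedLower.toList k < 0 ∨
          PySem.Chars.find pvPackedLower.toList k % 3 ≠ 0 := by
        by_contra hc
        push Not at hc
        rcases find_boundary k h3 (by omega) hc.2 with h | h | h | h | h | h | h <;>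
          first
          | exact h1 h | exact h2 h | exact h3' h | exact h4 h
          | exact h5 h | exact h6 h | exact h7 h
      rw [if_neg h1, if_neg h2, if_neg h3', if_neg h4, if_neg h5, if_neg h6, if_neg h7,
        if_neg (by simp [h3]), if_pos hbad]
  · have hnod : ∀ (d : List Char), d.length = 3 → k ≠ d := by
      intro d hd hkd
      rw [hkd] at h3; exact h3 hd
    rw [if_neg (hnod _ (by decide)), if_neg (hnod _ (by decide)),
      if_neg (hnod _ (by decide)), if_neg (hnod _ (by decide)),
      if_neg (hnod _ (by decide)), if_neg (hnod _ (by decide)),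
      if_neg (hnod _ (by decide)), if_pos (by exact_mod_cast h3)]

theorem core_eq (s : String) :
    normalizeWeekdayLoop s pvWeekdays =
      (if PySem.Str.len (PySem.Str.lower s) ≠ 3 then none
       else if PySem.Str.find pvPackedLower (PySem.Str.lower s) < 0 ∨
               PySem.Str.find pvPackedLower (PySem.Str.lower s) % 3 ≠ 0 then none
       else some (PySem.Str.slice pvPackedCanon
              (some (PySem.Str.find pvPackedLower (PySem.Str.lower s)))
              (some (PySem.Str.find pvPackedLower (PySem.Str.lower s) + 3)))) := by
  have hk : (PySem.Str.lower s).toList = PySem.Chars.lower s.toList := PySem.Str.toList_lower s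
  have hlen : PySem.Str.len (PySem.Str.lower s) = ((PySem.Chars.lower s.toList).length : Int) := by
    simp [PySem.Str.len_eq, hk]
  have hfind : PySem.Str.find pvPackedLower (PySem.Str.lower s) =
      PySem.Chars.find pvPackedLower.toList (PySem.Chars.lower s.toList) := by
    simp [PySem.Str.find_eq, hk]
  have hloop : normalizeWeekdayLoop s pvWeekdays =
      (if PySem.Chars.lower s.toList = ['m','o','n'] then some "Mon"
       else if PySem.Chars.lower s.toList = ['t','u','e'] then some "Tue"
       else if PySem.Chars.lower s.toList = ['w','e','d'] then some "Wed"
       else if PySem.Chars.lower s.toList = ['t','h','u'] then some "Thu"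
       else if PySem.Chars.lower s.toList = ['f','r','i'] then some "Fri"
       else if PySem.Chars.lower s.toList = ['s','a','t'] then some "Sat"
       else if PySem.Chars.lower s.toList = ['s','u','n'] then some "Sun"
       else none) := by
    simp only [normalizeWeekdayLoop, pvWeekdays, lower_eq_iff]
    norm_num [show PySem.Chars.lower "Mon".toList = ['m','o','n'] from by decide,
      show PySem.Chars.lower "Tue".toList = ['t','u','e'] from by decide,
      show PySem.Chars.lower "Wed".toList = ['w','e','d'] from by decide,
      show PySem.Chars.lower "Thu".toList = ['t','h','u'] from by decide,
      show PySem.Chars.lower "Fri".toList = ['f','r','i'] from by decide,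
      show PySem.Chars.lower "Sat".toList = ['s','a','t'] from by decide,
      show PySem.Chars.lower "Sun".toList = ['s','u','n'] from by decide]
  rw [hloop, hlen, hfind]
  exact branch_eq (PySem.Chars.lower s.toList)

-- ===== VERDICT (by name: the statement is the Claim_ definition above) =====
theorem normalize_weekday_py_spec : Claim_equal_normalize_weekday_py := by
  intro value _
  unfold Spec_normalize_weekday_py
  cases value with
  | none => rfl
  | some v =>
    unfold normalize_weekday_py normalize_weekday_py_alt
    by_cases hv : v = ""
    · simp [hv]
    · simp only [if_neg hv]
      exact core_eq (PySem.Str.strip v)
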